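-- pv_equiv track=rewrite | github.com/initialgyw/pyhomelab | pyhomelab/oci/__init__.py | set_freeform_tags
-- ===== SOURCE A (Python) =====
-- def set_freeform_tags(
--                       existing_tags: dict[str, str],
--                       set_tags: dict[str, str]
-- ) -> dict[str, str]:
--     '''Combine freeform tags
--
--     Parameters
--     ----------
--     existing_tags : dict[str, str]
--         tags that already exists on the resource
--     set_tags : dict[str, str]
--         tags you want to include
--
--     Returns
--     -------
--     dict[str, str]
--         combine tags if set_tags not in existing_tags
--     '''
--
--     combine_tags = {}
--     for key, value in set_tags.items():
--         if key not in existing_tags or value != existing_tags[key]: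
--             combine_tags = {**existing_tags, **set_tags}
--             break
--
--     return combine_tags
-- ===== SOURCE B (Python) =====
-- def set_freeform_tags(existing_tags: dict[str, str], set_tags: dict[str, str]) -> dict[str, str]:
--     """Build the merged dict first, then decide by comparing it with the original:
--     merging changed nothing iff every requested tag was already set."""
--     merged = {**existing_tags, **set_tags}
--     return merged if merged != existing_tags else {}
-- ===== Notes on version B (the rewrite author's own statement) =====
-- stated objective: simpler
-- what changed: Instead of scanning set_tags pair by pair with a break to decide whether to merge, B unconditionally builds the merged dict {**existing, **set} and returns it only if it differs from existing_tags (i.e. the merge actually changed something), else {} - compute-then-compare instead of test-then-compute.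
import Mathlib
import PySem

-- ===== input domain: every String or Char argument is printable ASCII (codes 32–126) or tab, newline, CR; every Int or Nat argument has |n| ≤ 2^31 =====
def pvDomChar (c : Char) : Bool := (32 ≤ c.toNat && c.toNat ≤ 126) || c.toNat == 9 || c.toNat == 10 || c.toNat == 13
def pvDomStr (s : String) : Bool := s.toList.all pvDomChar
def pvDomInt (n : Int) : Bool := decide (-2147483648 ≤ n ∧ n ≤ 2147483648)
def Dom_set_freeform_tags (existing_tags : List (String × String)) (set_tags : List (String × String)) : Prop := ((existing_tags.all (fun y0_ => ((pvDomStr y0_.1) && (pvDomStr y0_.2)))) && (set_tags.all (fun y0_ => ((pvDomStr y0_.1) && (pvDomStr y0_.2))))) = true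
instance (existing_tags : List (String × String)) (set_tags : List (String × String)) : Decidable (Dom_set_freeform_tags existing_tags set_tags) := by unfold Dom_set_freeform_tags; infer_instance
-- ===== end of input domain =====

-- B replaces A's per-key scan-with-break by building the merged dict first and comparing it with the original ('simpler'); return values proved equal on all inputs.

-- ===== PORT A =====
-- the 'for key, value in set_tags.items(): … break' loop; on the first differing pair it builds {**existing, **set}
def pvALoop (de ds : PySem.Dict String String) : List (String × String) → PySem.Dict String String
  | [] => PySem.Dict.empty
  | (k, v) :: rest =>
    if de.contains k = false ∨ de.get? k ≠ some v then
      ds.items.foldl (fun d p => d.insert p.1 p.2) de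
    else
      pvALoop de ds rest

def set_freeform_tags (existing_tags : List (String × String)) (set_tags : List (String × String)) : List (String × String) :=
  let de := PySem.Dict.ofList existing_tags
  let ds := PySem.Dict.ofList set_tags
  (pvALoop de ds ds.items).items

-- ===== PORT B =====
-- 'merged = {**existing_tags, **set_tags}; return merged if merged != existing_tags else {}'.
-- Python's dict '!=' ignores insertion order; comparing the items lists is exact here because the
-- merge keeps every existing key in place, so merged can equal existing as a dict only position for position.
def set_freeform_tags_alt (existing_tags : List (String × String)) (set_tags : List (String × String)) : List (String × String) :=
  let de := PySem.Dict.ofList existing_tags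
  let ds := PySem.Dict.ofList set_tags
  let merged := ds.items.foldl (fun d p => d.insert p.1 p.2) de
  if merged.items ≠ de.items then merged.items else []

-- ===== PRECONDITION & SPEC =====
def Spec_set_freeform_tags (existing_tags : List (String × String)) (set_tags : List (String × String)) (out : List (String × String)) : Prop := out = set_freeform_tags_alt existing_tags set_tags
instance (existing_tags : List (String × String)) (set_tags : List (String × String)) (out : List (String × String)) : Decidable (Spec_set_freeform_tags existing_tags set_tags out) := by unfold Spec_set_freeform_tags; infer_instance

-- ===== CLAIM =====
def Claim_equal_set_freeform_tags : Prop := ∀ (existing_tags : List (String × String)) (set_tags : List (String × String)), Dom_set_freeform_tags existing_tags set_tags → Spec_set_freeform_tags existing_tags set_tags (set_freeform_tags existing_tags set_tags)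

-- ===== LEMMAS AND PROOFS =====

-- A's loop condition on (k, v) is 'the pair (k, v) is not an item of de' (keys of de are unique)
lemma pvALoop_cond (de : PySem.Dict String String) (hnd : de.keys.Nodup) (k v : String) :
    (de.contains k = false ∨ de.get? k ≠ some v) ↔ ¬ (k, v) ∈ de.items := by
  rw [← PySem.Dict.get?_eq_some_iff_mem_items de k v hnd]
  constructor
  · rintro (hc | hne) hs
    · rw [PySem.Dict.contains_eq_isSome_get?, hs] at hc; simp at hc
    · exact hne hs
  · intro h; exact Or.inr h

lemma pvALoop_eq (de ds : PySem.Dict String String) (hnd : de.keys.Nodup) :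
    ∀ l : List (String × String),
      pvALoop de ds l =
        if l.all (fun p => decide (p ∈ de.items)) then PySem.Dict.empty
        else ds.items.foldl (fun d p => d.insert p.1 p.2) de := by
  intro l
  induction l with
  | nil => simp [pvALoop]
  | cons hd tl ih =>
    obtain ⟨k, v⟩ := hd
    by_cases hm : (k, v) ∈ de.items
    · rw [pvALoop]
      rw [if_neg (by rw [pvALoop_cond de hnd]; simp [hm])]
      rw [ih, List.all_cons, decide_eq_true hm, Bool.true_and]
    · rw [pvALoop]
      rw [if_pos (by rw [pvALoop_cond de hnd]; exact hm)]
      rw [List.all_cons, decide_eq_false hm, Bool.false_and, if_neg (by simp)]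

-- inserting a pair the dict already holds changes nothing
lemma insert_of_mem_items (d : PySem.Dict String String) (k v : String)
    (hnd : d.keys.Nodup) (hm : (k, v) ∈ d.items) : d.insert k v = d := by
  have hc : d.contains k = true := by
    rw [PySem.Dict.contains_eq_isSome_get?, PySem.Dict.get?_of_mem_items d hm hnd]; rfl
  apply PySem.Dict.ext
  rw [PySem.Dict.items_insert_of_contains d v hc]
  conv_rhs => rw [← List.map_id d.items]
  apply List.map_congr_left
  rintro ⟨p1, p2⟩ hp
  by_cases hk : p1 = k
  · -- keys are unique, so this pair is exactly (k, v)
    subst hk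
    have h1 := PySem.Dict.get?_of_mem_items d hp hnd
    have h2 := PySem.Dict.get?_of_mem_items d hm hnd
    have hv : p2 = v := Option.some.inj (h1.symm.trans h2)
    simp [hv]
  · simp [hk]

lemma foldl_insert_of_all_mem (l : List (String × String)) (d : PySem.Dict String String)
    (hnd : d.keys.Nodup) (h : ∀ p ∈ l, p ∈ d.items) :
    l.foldl (fun d p => d.insert p.1 p.2) d = d := by
  induction l with
  | nil => rfl
  | cons hd tl ih =>
    simp only [List.foldl_cons]
    rw [insert_of_mem_items d hd.1 hd.2 hnd (h hd (by simp))]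
    exact ih (fun p hp => h p (by simp [hp]))

-- a key not inserted by the loop keeps its lookup
lemma get?_foldl_insert_of_not_mem (l : List (String × String)) (d : PySem.Dict String String)
    (k : String) (hk : k ∉ l.map Prod.fst) :
    (l.foldl (fun d p => d.insert p.1 p.2) d).get? k = d.get? k := by
  induction l generalizing d with
  | nil => rfl
  | cons hd tl ih =>
    simp only [List.map_cons, List.mem_cons] at hk
    push Not at hk
    simp only [List.foldl_cons]
    rw [ih (d.insert hd.1 hd.2) hk.2, PySem.Dict.get?_insert_of_ne d hd.2 hk.1]

-- with distinct keys in l, every pair of l is looked up back from the fold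
lemma get?_foldl_insert_of_mem (l : List (String × String)) (d : PySem.Dict String String)
    (hnd : (l.map Prod.fst).Nodup) (k v : String) (hm : (k, v) ∈ l) :
    (l.foldl (fun d p => d.insert p.1 p.2) d).get? k = some v := by
  induction l generalizing d with
  | nil => cases hm
  | cons hd tl ih =>
    simp only [List.map_cons, List.nodup_cons] at hnd
    simp only [List.foldl_cons]
    rcases List.mem_cons.mp hm with h | h
    · subst h
      rw [get?_foldl_insert_of_not_mem tl _ k hnd.1]
      exact PySem.Dict.get?_insert_self _ _ _
    · exact ih _ hnd.2 h

-- the merge changes nothing iff every pair of ds is already an item of de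
lemma merged_items_eq_iff (de ds : PySem.Dict String String)
    (hde : de.keys.Nodup) (hds : ds.keys.Nodup) :
    (ds.items.foldl (fun d p => d.insert p.1 p.2) de).items = de.items ↔
      ds.items.all (fun p => decide (p ∈ de.items)) = true := by
  constructor
  · intro h
    rw [List.all_eq_true]
    rintro ⟨k, v⟩ hm
    simp only [decide_eq_true_eq]
    have hget : (ds.items.foldl (fun d p => d.insert p.1 p.2) de).get? k = some v :=
      get?_foldl_insert_of_mem ds.items de hds k v hm
    rw [PySem.Dict.ext h] at hget
    exact PySem.Dict.mem_items_of_get?_eq_some de hget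
  · intro h
    rw [foldl_insert_of_all_mem ds.items de hde
      (fun p hp => by simpa using List.all_eq_true.mp h p hp)]

-- ===== VERDICT =====
theorem set_freeform_tags_spec : Claim_equal_set_freeform_tags := by
  intro existing_tags set_tags _
  unfold Spec_set_freeform_tags set_freeform_tags set_freeform_tags_alt
  simp only []
  rw [pvALoop_eq (PySem.Dict.ofList existing_tags) (PySem.Dict.ofList set_tags)
      (PySem.Dict.nodup_keys_ofList existing_tags)]
  have hiff := merged_items_eq_iff (PySem.Dict.ofList existing_tags) (PySem.Dict.ofList set_tags)
    (PySem.Dict.nodup_keys_ofList existing_tags) (PySem.Dict.nodup_keys_ofList set_tags)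
  by_cases hall : ((PySem.Dict.ofList set_tags).items.all
      (fun p => decide (p ∈ (PySem.Dict.ofList existing_tags).items))) = true
  · have heq := hiff.mpr hall
    rw [if_pos hall, if_neg (not_not.mpr heq)]
    simp [PySem.Dict.empty]
  · have hne : ¬ ((PySem.Dict.ofList set_tags).items.foldl (fun d p => d.insert p.1 p.2)
        (PySem.Dict.ofList existing_tags)).items = (PySem.Dict.ofList existing_tags).items :=
      fun hctr => hall (hiff.mp hctr)
    rw [if_neg hall, if_pos hne]
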